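-- pv_equiv track=rewrite | github.com/kwasniewski27/prg-basics | 04-Functions/7_19.py | f
-- ===== SOURCE A (Python) =====
-- def f(number):
--     str_number = str(number)
--     repeated_sum = 0
--     seen = set()
--     repeated_digits = set()
--     for digit in str_number:
--         if digit in seen:
--             repeated_digits.add(digit)
--         else:
--             seen.add(digit)
--
--
--     for digit in repeated_digits:
--         repeated_sum += int(digit) * str_number.count(digit)
--
--     return repeated_sum
-- ===== SOURCE B (Python) =====
-- from itertools import groupby
--
--
-- def f(number):
--     total = 0
--     for digit, group in groupby(sorted(str(number))):
--         run = len(list(group))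
--         if run > 1:
--             total += int(digit) * run
--     return total
-- ===== Notes on version B (the rewrite author's own statement) =====
-- stated objective: alternative
-- what changed: Replaced A's two-set seen/repeated tracking plus per-repeated-digit str.count rescan with sort-then-groupby: sort the digit string once and scan consecutive equal runs, adding int(digit)*len(run) for runs longer than one.
import Mathlib
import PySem

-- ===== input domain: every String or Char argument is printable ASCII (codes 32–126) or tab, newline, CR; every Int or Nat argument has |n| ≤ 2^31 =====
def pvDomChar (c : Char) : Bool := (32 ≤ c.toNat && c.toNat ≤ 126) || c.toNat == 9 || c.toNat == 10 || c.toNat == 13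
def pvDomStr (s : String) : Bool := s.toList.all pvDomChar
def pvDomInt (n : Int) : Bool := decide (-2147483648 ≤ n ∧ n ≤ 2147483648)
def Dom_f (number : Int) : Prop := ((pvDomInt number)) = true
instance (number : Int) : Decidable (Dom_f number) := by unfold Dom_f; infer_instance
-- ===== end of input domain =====

-- B sorts the digit string once and scans consecutive equal runs (itertools.groupby),
-- adding int(digit)*run for runs longer than one — instead of A's two-set tracking
-- plus a per-repeated-digit str.count rescan (objective: alternative).

-- ===== PORT A =====
-- int(digit) for a one-character string; both Pythons apply it only to digit characters
-- ('-' never repeats in str(n)), so the `getD 0` default is unreachable there.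
def pyIntChar (c : Char) : Int := (PySem.Int.ofChars? [c]).getD 0

def f (number : Int) : Int :=
  let strNumber := PySem.Int.toChars number          -- str(number)
  -- for digit in str_number: if digit in seen: repeated_digits.add(digit) else: seen.add(digit)
  let st := strNumber.foldl
    (fun (p : PySem.Set Char × PySem.Set Char) digit =>
      if PySem.Set.contains p.1 digit then (p.1, PySem.Set.add p.2 digit)
      else (PySem.Set.add p.1 digit, p.2))
    (PySem.Set.empty, PySem.Set.empty)
  -- for digit in repeated_digits: repeated_sum += int(digit) * str_number.count(digit)
  -- (iterating the set is safe here: an Int sum does not depend on the iteration order;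
  --  str.count with a one-character needle is exactly the character count)
  st.2.foldl (fun acc digit => acc + pyIntChar digit * (strNumber.count digit : Int)) 0

-- ===== PORT B =====
-- for digit, group in groupby(sorted_list): consume one maximal run of equal adjacent
-- characters per step (takeWhile/dropWhile = greedy run of groupby), add int(digit)*run
-- when the run is longer than one.
def runScan : List Char → Int
  | [] => 0
  | d :: t =>
    let run : Int := ((t.takeWhile (fun x => x == d)).length : Int) + 1
    let rest := t.dropWhile (fun x => x == d)
    (if 1 < run then pyIntChar d * run else 0) + runScan rest
termination_by l => l.length
decreasing_by
  simp only [List.length_cons]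
  exact Nat.lt_succ_of_le (List.length_dropWhile_le _ _)

def f_alt (number : Int) : Int :=
  runScan (PySem.List.sorted (PySem.Int.toChars number) (fun c => c) false)

-- ===== PRECONDITION & SPEC =====
def Spec_f (number : Int) (out : Int) : Prop := out = f_alt number
instance (number : Int) (out : Int) : Decidable (Spec_f number out) := by unfold Spec_f; infer_instance

-- ===== CLAIM (what is proved, stated in full; the proofs are below) =====
def Claim_equal_f : Prop := ∀ (number : Int), Dom_f number → Spec_f number (f number)

-- ===== LEMMAS AND PROOFS =====

-- A's first loop: after folding s from (seen, rep), the repeated set is nodup and contains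
-- exactly the old members plus every x that is seen-and-reoccurring or occurs ≥ 2 times in s.
lemma loopA_inv (s : List Char) : ∀ (seen rep : PySem.Set Char), rep.Nodup →
    (s.foldl
      (fun (p : PySem.Set Char × PySem.Set Char) digit =>
        if PySem.Set.contains p.1 digit then (p.1, PySem.Set.add p.2 digit)
        else (PySem.Set.add p.1 digit, p.2)) (seen, rep)).2.Nodup ∧
    ∀ x, x ∈ (s.foldl
      (fun (p : PySem.Set Char × PySem.Set Char) digit =>
        if PySem.Set.contains p.1 digit then (p.1, PySem.Set.add p.2 digit)
        else (PySem.Set.add p.1 digit, p.2)) (seen, rep)).2 ↔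
      (x ∈ rep ∨ (x ∈ seen ∧ x ∈ s) ∨ 2 ≤ s.count x) := by
  induction s with
  | nil =>
    intro seen rep hrep
    simp [hrep]
  | cons d t ih =>
    intro seen rep hrep
    simp only [List.foldl_cons]
    by_cases hd : d ∈ seen
    · rw [if_pos (by simpa [PySem.Set.contains_iff] using hd)]
      obtain ⟨hn, hm⟩ := ih seen (PySem.Set.add rep d) (PySem.Set.nodup_add _ _ hrep)
      refine ⟨hn, fun x => (hm x).trans ?_⟩
      by_cases hx : x = d
      · subst hx
        simp [PySem.Set.mem_add, hd]
      · simp [PySem.Set.mem_add, hx, Ne.symm hx, List.mem_cons]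
    · rw [if_neg (by simpa [PySem.Set.contains_iff] using hd)]
      obtain ⟨hn, hm⟩ := ih (PySem.Set.add seen d) rep hrep
      refine ⟨hn, fun x => (hm x).trans ?_⟩
      by_cases hx : x = d
      · subst hx
        have hc : x ∈ t ↔ 1 ≤ t.count x := by
          rw [← List.count_pos_iff]; omega
        have h1 : List.count x (x :: t) = t.count x + 1 := by simp
        have h2 : x ∈ PySem.Set.add seen x := by simp [PySem.Set.mem_add]
        rw [h1]
        simp only [List.mem_cons]
        constructor
        · rintro (h | ⟨_, h⟩ | h)
          · exact Or.inl h
          · exact Or.inr (Or.inr (by have := hc.mp h; omega))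
          · exact Or.inr (Or.inr (by omega))
        · rintro (h | ⟨h, _⟩ | h)
          · exact Or.inl h
          · exact absurd h hd
          · exact Or.inr (Or.inl ⟨h2, hc.mpr (by omega)⟩)
      · simp [PySem.Set.mem_add, hx, Ne.symm hx, List.mem_cons]

-- Both results are proved equal to this order-insensitive sum over the distinct characters.
def distSum (base : List Char) (l : List Char) : Int :=
  ((PySem.Set.ofList l).map
    (fun k => if 1 < (base.count k : Int) then pyIntChar k * (base.count k : Int) else 0)).sum

-- A's result equals the distinct-character sum.
lemma f_eq_distSum (number : Int) :
    f number = distSum (PySem.Int.toChars number) (PySem.Int.toChars number) := by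
  unfold f distSum
  set s := PySem.Int.toChars number with hs
  obtain ⟨hn, hm⟩ := loopA_inv s PySem.Set.empty PySem.Set.empty List.nodup_nil
  rw [PySem.List.foldl_add, zero_add]
  have hperm : (s.foldl
      (fun (p : PySem.Set Char × PySem.Set Char) digit =>
        if PySem.Set.contains p.1 digit then (p.1, PySem.Set.add p.2 digit)
        else (PySem.Set.add p.1 digit, p.2)) (PySem.Set.empty, PySem.Set.empty)).2.Perm
      ((PySem.Set.ofList s).filter (fun k => decide (1 < (s.count k : Int)))) := by
    refine (List.perm_ext_iff_of_nodup hn ((PySem.Set.nodup_ofList s).filter _)).mpr ?_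
    intro x
    rw [hm x]
    simp only [PySem.Set.empty, List.mem_filter, PySem.Set.mem_ofList, decide_eq_true_eq]
    constructor
    · rintro (h | ⟨h, _⟩ | h)
      · simp at h
      · simp at h
      · refine ⟨List.count_pos_iff.mp (by omega), by exact_mod_cast h⟩
    · rintro ⟨_, h⟩
      exact Or.inr (Or.inr (by exact_mod_cast h))
  rw [List.Perm.sum_eq (List.Perm.map _ hperm)]
  -- sum over filter = sum of the guarded map
  induction (PySem.Set.ofList s) with
  | nil => simp
  | cons a t iht =>
    simp only [Nat.one_lt_cast] at iht
    by_cases ha : 1 < s.count a <;>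
      simp [ha, Nat.one_lt_cast, iht]

-- The run scan over any sorted (Pairwise ≤) list equals the distinct-character sum over it.
lemma runScan_eq (n : Nat) : ∀ (l : List Char), l.length ≤ n → l.Pairwise (· ≤ ·) →
    runScan l = distSum l l := by
  induction n with
  | zero =>
    intro l hl _
    have : l = [] := List.eq_nil_of_length_eq_zero (Nat.le_zero.mp hl)
    subst this
    simp [runScan, distSum, PySem.Set.ofList]
  | succ n ih =>
    intro l hl hp
    match l with
    | [] => simp [runScan, distSum, PySem.Set.ofList]
    | d :: t =>
      rw [runScan]
      obtain ⟨mid, hmid⟩ : ∃ m, t.takeWhile (fun x => x == d) = m := ⟨_, rfl⟩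
      obtain ⟨rest, hrest⟩ : ∃ r, t.dropWhile (fun x => x == d) = r := ⟨_, rfl⟩
      rw [hmid, hrest]
      have hsplit : t = mid ++ rest := by
        rw [← hmid, ← hrest]; exact (List.takeWhile_append_dropWhile).symm
      have hmid_all : ∀ x ∈ mid, x = d := by
        intro x hx
        rw [← hmid] at hx
        simpa using List.mem_takeWhile_imp hx
      have hd_not_rest : d ∉ rest := by
        intro hmem
        match rest, hrest, hmem with
        | y :: r, hrest, hmem =>
          have hne : t.dropWhile (fun x => x == d) ≠ [] := by simp [hrest]
          have hy0 : ((t.dropWhile (fun x => x == d)).head hne == d) = false :=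
            List.head_dropWhile_not (fun x => x == d) hne
          have hhead : (t.dropWhile (fun x => x == d)).head hne = y := by
            simp [hrest]
          rw [hhead] at hy0
          have hyd : y ≠ d := by simpa using hy0
          have hdy : d ≤ y := (List.pairwise_cons.mp hp).1 y
            (by rw [hsplit]; exact List.mem_append_right _ List.mem_cons_self)
          rcases List.mem_cons.mp hmem with h1 | h1
          · exact hyd h1.symm
          · have hrp : (y :: r).Pairwise (· ≤ ·) := by
              have hsub : (y :: r).Sublist t := hrest ▸ List.dropWhile_sublist _
              exact ((List.pairwise_cons.mp hp).2).sublist hsub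
            have hyd2 : y ≤ d := (List.pairwise_cons.mp hrp).1 d h1
            exact hyd (le_antisymm hyd2 hdy)
      -- counts
      have hcount_d : ((d :: t).count d : Int) = (mid.length : Int) + 1 := by
        have h1 : mid.count d = mid.length :=
          List.count_eq_length.mpr (fun x hx => by simp [hmid_all x hx])
        have h2 : rest.count d = 0 := List.count_eq_zero.mpr hd_not_rest
        rw [hsplit]
        simp [List.count_append, h1, h2]
      have hcount_ne : ∀ k, k ≠ d → (d :: t).count k = rest.count k := by
        intro k hk
        have h1 : mid.count k = 0 :=
          List.count_eq_zero.mpr (fun h => hk (hmid_all k h))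
        rw [hsplit]
        simp [List.count_append, h1, Ne.symm hk]
      -- distinct chars of l ~ d :: distinct chars of rest
      have hofl : (PySem.Set.ofList (d :: t)).Perm (d :: PySem.Set.ofList rest) := by
        refine (List.perm_ext_iff_of_nodup (PySem.Set.nodup_ofList _) ?_).mpr ?_
        · exact List.nodup_cons.mpr
            ⟨fun h => hd_not_rest ((PySem.Set.mem_ofList _ _).mp h), PySem.Set.nodup_ofList _⟩
        · intro x
          simp only [PySem.Set.mem_ofList, List.mem_cons]
          constructor
          · rintro (h | h)
            · exact Or.inl h
            · rw [hsplit] at h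
              rcases List.mem_append.mp h with h | h
              · exact Or.inl (hmid_all x h)
              · exact Or.inr h
          · rintro (h | h)
            · exact Or.inl h
            · exact Or.inr (by
                rw [hsplit]
                exact List.mem_append_right _ h)
      have hrest_pw : rest.Pairwise (· ≤ ·) := by
        have hsub : rest.Sublist t := hrest ▸ List.dropWhile_sublist _
        exact ((List.pairwise_cons.mp hp).2).sublist hsub
      have hrest_len : rest.length ≤ n := by
        have h1 : rest.length ≤ t.length := by
          rw [← hrest]; exact List.length_dropWhile_le _ _
        have h2 : t.length + 1 ≤ n + 1 := by simpa using hl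
        omega
      have hih : runScan rest =
          ((PySem.Set.ofList rest).map
            (fun k => if 1 < (rest.count k : Int) then pyIntChar k * (rest.count k : Int) else 0)).sum :=
        ih rest hrest_len hrest_pw
      unfold distSum
      rw [List.Perm.sum_eq (List.Perm.map _ hofl)]
      rw [List.map_cons, List.sum_cons]
      have hmap : (PySem.Set.ofList rest).map
          (fun k => if 1 < ((d :: t).count k : Int) then pyIntChar k * ((d :: t).count k : Int) else 0)
          = (PySem.Set.ofList rest).map
          (fun k => if 1 < (rest.count k : Int) then pyIntChar k * (rest.count k : Int) else 0) := by
        refine List.map_congr_left ?_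
        intro k hk
        have hkd : k ≠ d := fun h =>
          hd_not_rest (h ▸ (PySem.Set.mem_ofList _ _).mp hk)
        rw [hcount_ne k hkd]
      rw [hmap, hih, hcount_d]

-- B's result equals the distinct-character sum over the original digit string.
lemma f_alt_eq_distSum (number : Int) :
    f_alt number = distSum (PySem.Int.toChars number) (PySem.Int.toChars number) := by
  unfold f_alt
  set s := PySem.Int.toChars number with hs
  set l := PySem.List.sorted s (fun c => c) false with hl
  have hperm : l.Perm s := PySem.List.sorted_perm _ _ _
  have hpw : l.Pairwise (· ≤ ·) := PySem.List.sorted_pairwise s (fun c => c)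
  rw [runScan_eq l.length l le_rfl hpw]
  unfold distSum
  have hcount : ∀ k, l.count k = s.count k := fun k => hperm.count_eq k
  have hof : (PySem.Set.ofList l).Perm (PySem.Set.ofList s) := by
    refine (List.perm_ext_iff_of_nodup (PySem.Set.nodup_ofList _)
      (PySem.Set.nodup_ofList _)).mpr ?_
    intro x
    rw [PySem.Set.mem_ofList, PySem.Set.mem_ofList]
    exact hperm.mem_iff
  rw [List.Perm.sum_eq (List.Perm.map _ hof)]
  refine congrArg _ (List.map_congr_left ?_)
  intro k _
  rw [hcount]

-- ===== VERDICT (by name: the statement is the Claim_ definition above) =====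
theorem f_spec : Claim_equal_f := by
  intro number _
  unfold Spec_f
  rw [f_eq_distSum, f_alt_eq_distSum]
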